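-- pv_equiv track=rewrite | github.com/chinggg/chinggg | Sec/Crypto/utils.py | wordpat
-- ===== SOURCE A (Python) =====
-- def wordpat(w):
--     i, dic, lst = 0, {}, []
--     for ch in w:
--         try:
--             x = dic[ch]
--         except KeyError:
--             dic[ch] = x = i
--             i += 1
--         lst.append(x)
--     return '.'.join([str(x) for x in lst])
-- ===== SOURCE B (Python) =====
-- def wordpat(w):
--     first = {ch: w.index(ch) for ch in set(w)}
--     return '.'.join(str(sum(f < first[ch] for f in first.values())) for ch in w)
-- ===== Notes on version B (the rewrite author's own statement) =====
-- stated objective: alternative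
-- what changed: Replaces A's stateful scan (incremental counter + try/except dict assigning ids as it appends) with rank-by-counting: a first-occurrence-index table built by comprehension, then each character's id computed independently as the count of distinct characters whose first occurrence is earlier.
import Mathlib
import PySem

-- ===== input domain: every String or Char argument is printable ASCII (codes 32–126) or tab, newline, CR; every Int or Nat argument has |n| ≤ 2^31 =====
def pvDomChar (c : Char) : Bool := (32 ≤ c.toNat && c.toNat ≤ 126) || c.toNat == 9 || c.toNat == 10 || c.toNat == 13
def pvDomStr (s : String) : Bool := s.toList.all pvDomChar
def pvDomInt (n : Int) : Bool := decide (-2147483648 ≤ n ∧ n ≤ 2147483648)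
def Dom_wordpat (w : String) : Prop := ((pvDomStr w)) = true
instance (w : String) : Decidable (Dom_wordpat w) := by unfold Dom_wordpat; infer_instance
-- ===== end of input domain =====

-- B replaces A's incremental counter with rank-by-counting: each character's id is the number of distinct characters whose first occurrence is earlier (alternative decomposition, not faster).


-- ===== PORT A =====
-- one step of A's loop body: try dic[ch] / except KeyError: assign new id; then append
def wordpatStep (st : Int × PySem.Dict Char Int × List Int) (ch : Char) :
    Int × PySem.Dict Char Int × List Int :=
  match st with
  | (i, dic, lst) =>
    match dic.get? ch with
    | some x => (i, dic, lst ++ [x])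
    | none   => (i + 1, dic.insert ch i, lst ++ [i])

def wordpat (w : String) : String :=
  PySem.Str.join "."
    ((w.toList.foldl wordpatStep (0, PySem.Dict.empty, [])).2.2.map (fun x => PySem.Int.toStr x))

-- ===== PORT B =====
-- first = {ch: w.index(ch) for ch in set(w)}; every ch of w is in w and in first's keys, so
-- w.index's ValueError and first[ch]'s KeyError are unreachable: ported as .getD 0
def wordpat_alt (w : String) : String :=
  let first : PySem.Dict Char Int :=
    (PySem.Set.ofList w.toList).foldl
      (fun d ch => d.insert ch (((PySem.List.index? w.toList ch).getD 0 : Nat) : Int))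
      PySem.Dict.empty
  PySem.Str.join "."
    (w.toList.map (fun ch =>
      PySem.Int.toStr ((first.values.countP (fun f => f < first.getD ch 0) : Nat) : Int)))

-- ===== PRECONDITION & SPEC =====
def Spec_wordpat (w : String) (out : String) : Prop := out = wordpat_alt w
instance (w : String) (out : String) : Decidable (Spec_wordpat w out) := by unfold Spec_wordpat; infer_instance

-- ===== CLAIM (what is proved, stated in full; the proofs are below) =====
def Claim_equal_wordpat : Prop := ∀ (w : String), Dom_wordpat w → Spec_wordpat w (wordpat w)

-- ===== LEMMAS AND PROOFS =====

-- first-occurrence dedup of a prefix stays a prefix of the dedup of the whole list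
lemma ofList_append_decomp (p r : List Char) :
    ∃ t, PySem.Set.ofList (p ++ r) = PySem.Set.ofList p ++ t :=
  ⟨_, by rw [PySem.Set.ofList_append, PySem.Set.update_eq_append_filter]⟩

-- loop invariant for A: the appended ids are the indices into the dedup of the string
lemma wordpat_loop (r : List Char) : ∀ (p : List Char) (d : PySem.Dict Char Int) (i : Int) (lst : List Int),
    i = ((PySem.Set.ofList p).length : Int) →
    (∀ ch, d.get? ch = Option.map (fun n : Nat => (n : Int)) (PySem.List.index? (PySem.Set.ofList p) ch)) →
    (r.foldl wordpatStep (i, d, lst)).2.2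
      = lst ++ r.map (fun ch =>
          (((PySem.List.index? (PySem.Set.ofList (p ++ r)) ch).getD 0 : Nat) : Int)) := by
  induction r with
  | nil => intro p d i lst _ _; simp
  | cons ch r' IH =>
    intro p d i lst hi hd
    by_cases hmem : ch ∈ p
    · have hmem' : ch ∈ PySem.Set.ofList p := (PySem.Set.mem_ofList p ch).2 hmem
      obtain ⟨k, hk⟩ := Option.isSome_iff_exists.1 ((PySem.List.index?_isSome_iff _ _).2 hmem')
      have hget : d.get? ch = some ((k : Nat) : Int) := by rw [hd ch, hk, Option.map_some]
      have hstep : wordpatStep (i, d, lst) ch = (i, d, lst ++ [((k : Nat) : Int)]) := by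
        simp only [wordpatStep, hget]
      have hof : PySem.Set.ofList (p ++ [ch]) = PySem.Set.ofList p := by
        rw [PySem.Set.ofList_append_singleton, PySem.Set.add_of_mem hmem']
      have hIH := IH (p ++ [ch]) d i (lst ++ [((k : Nat) : Int)])
        (by rw [hof]; exact hi) (by intro x; rw [hof]; exact hd x)
      have hassoc : (p ++ [ch]) ++ r' = p ++ ch :: r' := by simp
      obtain ⟨t, ht⟩ := ofList_append_decomp p (ch :: r')
      have hidx : PySem.List.index? (PySem.Set.ofList (p ++ ch :: r')) ch = some k := by
        rw [ht, PySem.List.index?_append_of_mem t hmem', hk]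
      rw [List.foldl_cons, hstep, hIH, hassoc]
      simp only [List.map_cons, hidx, Option.getD_some, List.append_assoc, List.singleton_append]
    · have hmem' : ch ∉ PySem.Set.ofList p := fun h => hmem ((PySem.Set.mem_ofList p ch).1 h)
      have hnone : d.get? ch = none := by
        rw [hd ch, (PySem.List.index?_eq_none_iff _ _).2 hmem', Option.map_none]
      have hstep : wordpatStep (i, d, lst) ch = (i + 1, d.insert ch i, lst ++ [i]) := by
        simp only [wordpatStep, hnone]
      have hof : PySem.Set.ofList (p ++ [ch]) = PySem.Set.ofList p ++ [ch] := by
        rw [PySem.Set.ofList_append_singleton, PySem.Set.add_of_not_mem hmem']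
      have hIH := IH (p ++ [ch]) (d.insert ch i) (i + 1) (lst ++ [i])
        (by rw [hof]; simp only [List.length_append, List.length_singleton]; push_cast; omega)
        (by
          intro x
          rw [PySem.Dict.get?_insert, hof]
          by_cases hx : x = ch
          · subst hx
            rw [if_pos rfl, PySem.List.index?_append_singleton_self _ x hmem',
                Option.map_some, hi]
          · rw [if_neg hx]
            by_cases hxm : x ∈ PySem.Set.ofList p
            · rw [PySem.List.index?_append_of_mem [ch] hxm, hd x]
            · have hxm2 : x ∉ PySem.Set.ofList p ++ [ch] := by
                intro h
                rcases List.mem_append.1 h with h | h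
                · exact hxm h
                · exact hx (List.mem_singleton.1 h)
              rw [(PySem.List.index?_eq_none_iff _ _).2 hxm2, hd x,
                  (PySem.List.index?_eq_none_iff _ _).2 hxm])
      have hassoc : (p ++ [ch]) ++ r' = p ++ ch :: r' := by simp
      obtain ⟨t, ht⟩ := ofList_append_decomp (p ++ [ch]) r'
      have hchm : ch ∈ PySem.Set.ofList p ++ [ch] := by simp
      have hidx : PySem.List.index? (PySem.Set.ofList (p ++ ch :: r')) ch
          = some (PySem.Set.ofList p).length := by
        rw [← hassoc, ht, hof, PySem.List.index?_append_of_mem t hchm,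
            PySem.List.index?_append_singleton_self _ ch hmem']
      rw [List.foldl_cons, hstep, hIH, hassoc]
      simp only [List.map_cons, hidx, Option.getD_some, List.append_assoc, List.singleton_append, hi]

-- the first-occurrence indices of the dedup list are strictly increasing
lemma firstIdx_pairwise (l : List Char) :
    List.Pairwise (· < ·)
      ((PySem.Set.ofList l).map (fun d => (PySem.List.index? l d).getD 0)) := by
  induction l using List.reverseRecOn with
  | nil => simp [PySem.Set.ofList_nil]
  | append_singleton l x IH =>
    by_cases hx : x ∈ PySem.Set.ofList l
    · rw [PySem.Set.ofList_append_singleton, PySem.Set.add_of_mem hx]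
      have : (PySem.Set.ofList l).map (fun d => (PySem.List.index? (l ++ [x]) d).getD 0)
          = (PySem.Set.ofList l).map (fun d => (PySem.List.index? l d).getD 0) := by
        apply List.map_congr_left
        intro d hd
        rw [PySem.List.index?_append_of_mem [x] ((PySem.Set.mem_ofList l d).1 hd)]
      rw [this]; exact IH
    · rw [PySem.Set.ofList_append_singleton, PySem.Set.add_of_not_mem hx, List.map_append]
      have hmap : (PySem.Set.ofList l).map (fun d => (PySem.List.index? (l ++ [x]) d).getD 0)
          = (PySem.Set.ofList l).map (fun d => (PySem.List.index? l d).getD 0) := by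
        apply List.map_congr_left
        intro d hd
        rw [PySem.List.index?_append_of_mem [x] ((PySem.Set.mem_ofList l d).1 hd)]
      rw [List.pairwise_append, hmap]
      refine ⟨IH, by simp, ?_⟩
      intro a ha b hb
      simp only [List.map_cons, List.map_nil, List.mem_singleton] at hb
      have hxl : x ∉ l := fun h => hx ((PySem.Set.mem_ofList l x).2 h)
      rw [hb, PySem.List.index?_append_singleton_self _ x hxl, Option.getD_some]
      obtain ⟨d, hd, rfl⟩ := List.mem_map.1 ha
      have hdl : d ∈ l := (PySem.Set.mem_ofList l d).1 hd
      obtain ⟨k, hk⟩ := Option.isSome_iff_exists.1 ((PySem.List.index?_isSome_iff _ _).2 hdl)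
      obtain ⟨hklt, -, -⟩ := PySem.List.getElem_of_index?_eq_some hk
      rw [hk, Option.getD_some]
      exact hklt

-- in a strictly increasing Nat list, the number of entries below ys[k] is k
lemma countP_lt_of_pairwise : ∀ (ys : List Nat) (k : Nat) (hk : k < ys.length),
    List.Pairwise (· < ·) ys →
    ys.countP (fun v => decide (v < ys[k])) = k := by
  intro ys
  induction ys with
  | nil => intro k hk; simp at hk
  | cons a t IH =>
    intro k hk hp
    have hpt := hp.tail
    have hhead := List.pairwise_cons.1 hp |>.1
    match k with
    | 0 =>
      simp only [List.getElem_cons_zero]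
      rw [List.countP_eq_zero]
      intro v hv
      simp only [decide_eq_true_eq]
      rcases List.mem_cons.1 hv with rfl | hv'
      · exact lt_irrefl v
      · exact not_lt.2 (le_of_lt (hhead v hv'))
    | k' + 1 =>
      have hk' : k' < t.length := by simpa using hk
      have hget : (a :: t)[k' + 1] = t[k'] := rfl
      have hmem : t[k'] ∈ t := List.getElem_mem hk'
      simp only [hget, List.countP_cons]
      rw [IH k' hk' hpt]
      have : (decide (a < t[k'])) = true := by simp [hhead _ hmem]
      simp [this]

-- B's per-character count equals A's dedup index
lemma count_eq_index (l : List Char) (ch : Char) (hch : ch ∈ l) :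
    ((PySem.Set.ofList l).map (fun d => ((((PySem.List.index? l d).getD 0 : Nat)) : Int))).countP
        (fun f => f < (((PySem.List.index? l ch).getD 0 : Nat) : Int))
      = (PySem.List.index? (PySem.Set.ofList l) ch).getD 0 := by
  have hchs : ch ∈ PySem.Set.ofList l := (PySem.Set.mem_ofList l ch).2 hch
  obtain ⟨k, hk⟩ := Option.isSome_iff_exists.1 ((PySem.List.index?_isSome_iff _ _).2 hchs)
  obtain ⟨hklt, hgetk, -⟩ := PySem.List.getElem_of_index?_eq_some hk
  set g : Char → Nat := fun d => (PySem.List.index? l d).getD 0 with hg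
  have hcast : ((PySem.Set.ofList l).map (fun d => ((g d : Nat) : Int))).countP
      (fun f => f < ((g ch : Nat) : Int))
      = ((PySem.Set.ofList l).map g).countP (fun v => decide (v < g ch)) := by
    rw [List.countP_map, List.countP_map]
    apply List.countP_congr
    intro d _
    simp [Function.comp]
  have hklt' : k < ((PySem.Set.ofList l).map g).length := by simpa using hklt
  have hgk : ((PySem.Set.ofList l).map g)[k] = g ch := by
    rw [List.getElem_map]; rw [hgetk]
  have hcount := countP_lt_of_pairwise ((PySem.Set.ofList l).map g) k hklt' (firstIdx_pairwise l)
  rw [hgk] at hcount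
  rw [hk, Option.getD_some, hcast, hcount]

-- the dict comprehension over set(w): values in dedup order, lookup = first-occurrence index
lemma first_dict_spec (l : List Char) :
    let first := (PySem.Set.ofList l).foldl
      (fun d ch => d.insert ch (((PySem.List.index? l ch).getD 0 : Nat) : Int)) PySem.Dict.empty
    first.items = (PySem.Set.ofList l).map
      (fun ch => (ch, (((PySem.List.index? l ch).getD 0 : Nat) : Int))) := by
  apply PySem.Dict.items_foldl_insert_fresh
  · intro a _; exact PySem.Dict.contains_empty a
  · simp

-- ===== VERDICT (by name: the statement is the Claim_ definition above) =====
theorem wordpat_spec : Claim_equal_wordpat := by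
  intro w _
  unfold Spec_wordpat wordpat wordpat_alt
  have hA := wordpat_loop w.toList [] PySem.Dict.empty 0 []
    (by simp) (by intro ch; rfl)
  simp only [List.nil_append] at hA
  rw [hA, List.map_map]
  set l := w.toList with hl
  have hitems := first_dict_spec l
  simp only at hitems
  set first := (PySem.Set.ofList l).foldl
      (fun d ch => d.insert ch (((PySem.List.index? l ch).getD 0 : Nat) : Int)) PySem.Dict.empty
    with hfirst
  have hvals : first.values = (PySem.Set.ofList l).map
      (fun ch => (((PySem.List.index? l ch).getD 0 : Nat) : Int)) := by
    show first.items.map (·.2) = _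
    rw [hitems, List.map_map]; rfl
  have hkeys : first.keys = PySem.Set.ofList l := by
    show first.items.map (·.1) = _
    rw [hitems, List.map_map]
    show List.map (fun ch => ch) (PySem.Set.ofList l) = PySem.Set.ofList l
    exact List.map_id' _
  have hnodup : first.keys.Nodup := by rw [hkeys]; exact PySem.Set.nodup_ofList l
  congr 1
  apply List.map_congr_left
  intro ch hch
  have hchs : ch ∈ PySem.Set.ofList l := (PySem.Set.mem_ofList l ch).2 hch
  have hgetD : first.getD ch 0 = (((PySem.List.index? l ch).getD 0 : Nat) : Int) :=
    PySem.Dict.getD_of_mem_items first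
      (by rw [hitems]; exact List.mem_map.2 ⟨ch, hchs, rfl⟩) hnodup 0
  simp only [Function.comp, hgetD, hvals]
  rw [count_eq_index l ch hch]
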